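-- pv_equiv track=rewrite | github.com/d3flex/Delphos | generator/sources/manpages.py | _parse_man_page
-- ===== SOURCE A (Python) =====
-- def _parse_man_page(man_output: str) -> str:
--     if not man_output:
--         return ""
--
--     sections_to_extract = [
--         "NAME",
--         "SYNOPSIS",
--         "DESCRIPTION",
--         "RETURN VALUE",
--         "ERRORS",
--     ]
--     extracted = []
--
--     lines = man_output.split("\n")
--     current_section = None
--     section_content = []
--
--     for line in lines:
--         if line.strip() and line.strip().isupper() and not line.startswith(" "):
--             if current_section in sections_to_extract and section_content:
--                 extracted.append(f"{current_section}:\n{''.join(section_content)}")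
--
--             current_section = line.strip()
--             section_content = []
--         elif current_section in sections_to_extract:
--             section_content.append(line + "\n")
--
--     if current_section in sections_to_extract and section_content:
--         extracted.append(f"{current_section}:\n{''.join(section_content)}")
--
--     result = "\n\n".join(extracted)
--
--     if len(result) > 2000:
--         result = result[:2000] + "\n... (truncated)"
--
--     return result
-- ===== SOURCE B (Python) =====
-- def _parse_man_page(man_output: str) -> str:
--     if not man_output:
--         return ""
--
--     wanted = {"NAME", "SYNOPSIS", "DESCRIPTION", "RETURN VALUE", "ERRORS"}
--
--     # Pass 1: split the text into ordered (header, content_lines) blocks.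
--     blocks = []
--     for line in man_output.split("\n"):
--         stripped = line.strip()
--         if stripped and stripped.isupper() and not line.startswith(" "):
--             blocks.append((stripped, []))
--         elif blocks:
--             blocks[-1][1].append(line + "\n")
--
--     # Pass 2: keep wanted, non-empty blocks and format them.
--     parts = [f"{h}:\n{''.join(c)}" for h, c in blocks if h in wanted and c]
--
--     result = "\n\n".join(parts)
--     if len(result) > 2000:
--         result = result[:2000] + "\n... (truncated)"
--     return result
-- ===== Notes on version B (the rewrite author's own statement) =====
-- stated objective: simpler
-- what changed: A's single loop interleaving section tracking, wanted-section filtering and incremental flushing of formatted output is replaced by a two-pass decomposition: pass 1 groups the lines into an ordered list of (header, content-lines) blocks, pass 2 filters the wanted non-empty blocks and formats them in a comprehension.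
import Mathlib
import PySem

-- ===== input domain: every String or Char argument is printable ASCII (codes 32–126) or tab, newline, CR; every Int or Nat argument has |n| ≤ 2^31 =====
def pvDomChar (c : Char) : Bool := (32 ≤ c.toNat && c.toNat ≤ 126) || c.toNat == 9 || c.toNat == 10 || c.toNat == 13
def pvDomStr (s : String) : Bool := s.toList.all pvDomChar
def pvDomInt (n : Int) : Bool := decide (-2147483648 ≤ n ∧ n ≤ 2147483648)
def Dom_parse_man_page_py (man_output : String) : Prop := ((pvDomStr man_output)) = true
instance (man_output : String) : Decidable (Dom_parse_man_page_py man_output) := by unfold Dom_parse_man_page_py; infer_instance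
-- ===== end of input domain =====

-- B replaces A's interleaved section/flush state machine by a two-pass decomposition
-- (group lines into (header, content) blocks, then filter-and-format); same cost, simpler.

-- ===== PORT A =====
-- Python's str.isupper(), hand-ported (PySem has only the Char-level predicate):
-- exact on the printable-ASCII domain, where the cased characters are exactly a-z/A-Z.
def pvStrIsupper (s : String) : Bool :=
  s.toList.any (fun c => PySem.Str.isupper c || PySem.Str.islower c)
    && !(s.toList.any (fun c => PySem.Str.islower c))

def pvSections : List String := ["NAME", "SYNOPSIS", "DESCRIPTION", "RETURN VALUE", "ERRORS"]

-- Python's 'current_section in sections_to_extract' (current_section may be None)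
def pvAwanted (cs : Option String) : Bool :=
  match cs with
  | some c => pvSections.contains c
  | none => false

-- loop body of A; state = (extracted, current_section, section_content)
def pvAstep (st : List String × Option String × List String) (line : String) :
    List String × Option String × List String :=
  if PySem.Str.strip line != "" && pvStrIsupper (PySem.Str.strip line)
      && !(PySem.Str.startswith line " ") then
    ( (if pvAwanted st.2.1 && !st.2.2.isEmpty then
         st.1 ++ [st.2.1.getD "" ++ ":\n" ++ PySem.Str.join "" st.2.2]
       else st.1),
      some (PySem.Str.strip line), [] )
  else if pvAwanted st.2.1 then
    (st.1, st.2.1, st.2.2 ++ [line ++ "\n"])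
  else
    (st.1, st.2.1, st.2.2)

-- after the loop: the final flush, '\n\n'.join, and the > 2000 truncation
def parse_man_page_py (man_output : String) : String :=
  if man_output == "" then ""
  else
    -- lines = man_output.split("\n"): sep ≠ "", so split? is always some
    if PySem.Str.len (PySem.Str.join "\n\n"
        (if pvAwanted (((PySem.Str.split? man_output "\n").getD []).foldl pvAstep ([], none, [])).2.1 &&
            !(((PySem.Str.split? man_output "\n").getD []).foldl pvAstep ([], none, [])).2.2.isEmpty then
          (((PySem.Str.split? man_output "\n").getD []).foldl pvAstep ([], none, [])).1 ++
            [(((PySem.Str.split? man_output "\n").getD []).foldl pvAstep ([], none, [])).2.1.getD "" ++ ":\n" ++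
              PySem.Str.join "" (((PySem.Str.split? man_output "\n").getD []).foldl pvAstep ([], none, [])).2.2]
        else (((PySem.Str.split? man_output "\n").getD []).foldl pvAstep ([], none, [])).1)) > 2000 then
      PySem.Str.slice (PySem.Str.join "\n\n"
        (if pvAwanted (((PySem.Str.split? man_output "\n").getD []).foldl pvAstep ([], none, [])).2.1 &&
            !(((PySem.Str.split? man_output "\n").getD []).foldl pvAstep ([], none, [])).2.2.isEmpty then
          (((PySem.Str.split? man_output "\n").getD []).foldl pvAstep ([], none, [])).1 ++
            [(((PySem.Str.split? man_output "\n").getD []).foldl pvAstep ([], none, [])).2.1.getD "" ++ ":\n" ++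
              PySem.Str.join "" (((PySem.Str.split? man_output "\n").getD []).foldl pvAstep ([], none, [])).2.2]
        else (((PySem.Str.split? man_output "\n").getD []).foldl pvAstep ([], none, [])).1))
        none (some 2000) ++ "\n... (truncated)"
    else
      PySem.Str.join "\n\n"
        (if pvAwanted (((PySem.Str.split? man_output "\n").getD []).foldl pvAstep ([], none, [])).2.1 &&
            !(((PySem.Str.split? man_output "\n").getD []).foldl pvAstep ([], none, [])).2.2.isEmpty then
          (((PySem.Str.split? man_output "\n").getD []).foldl pvAstep ([], none, [])).1 ++
            [(((PySem.Str.split? man_output "\n").getD []).foldl pvAstep ([], none, [])).2.1.getD "" ++ ":\n" ++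
              PySem.Str.join "" (((PySem.Str.split? man_output "\n").getD []).foldl pvAstep ([], none, [])).2.2]
        else (((PySem.Str.split? man_output "\n").getD []).foldl pvAstep ([], none, [])).1)

-- ===== PORT B =====
def pvWanted : PySem.Set String :=
  PySem.Set.ofList ["NAME", "SYNOPSIS", "DESCRIPTION", "RETURN VALUE", "ERRORS"]

-- pass 1 body of B: start a new block on a header line, else extend the last block
def pvBstep (blocks : List (String × List String)) (line : String) :
    List (String × List String) :=
  if PySem.Str.strip line != "" && pvStrIsupper (PySem.Str.strip line)
      && !(PySem.Str.startswith line " ") then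
    blocks ++ [(PySem.Str.strip line, [])]
  else
    match blocks.getLast? with
    | some (h, c) => blocks.dropLast ++ [(h, c ++ [line ++ "\n"])]
    | none => blocks

-- pass 2 of B: the kept-and-formatted parts of the block list
def pvBparts (blocks : List (String × List String)) : List String :=
  (blocks.filter (fun b => PySem.Set.contains pvWanted b.1 && !b.2.isEmpty)).map
    (fun b => b.1 ++ ":\n" ++ PySem.Str.join "" b.2)

def parse_man_page_py_alt (man_output : String) : String :=
  if man_output == "" then ""
  else
    if PySem.Str.len (PySem.Str.join "\n\n"
        (pvBparts (((PySem.Str.split? man_output "\n").getD []).foldl pvBstep []))) > 2000 then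
      PySem.Str.slice (PySem.Str.join "\n\n"
        (pvBparts (((PySem.Str.split? man_output "\n").getD []).foldl pvBstep [])))
        none (some 2000) ++ "\n... (truncated)"
    else
      PySem.Str.join "\n\n"
        (pvBparts (((PySem.Str.split? man_output "\n").getD []).foldl pvBstep []))

-- ===== PRECONDITION & SPEC =====
def Spec_parse_man_page_py (man_output : String) (out : String) : Prop := out = parse_man_page_py_alt man_output
instance (man_output : String) (out : String) : Decidable (Spec_parse_man_page_py man_output out) := by unfold Spec_parse_man_page_py; infer_instance

-- ===== CLAIM (what is proved, stated in full; the proofs are below) =====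
def Claim_equal_parse_man_page_py : Prop := ∀ (man_output : String), Dom_parse_man_page_py man_output → Spec_parse_man_page_py man_output (parse_man_page_py man_output)

-- ===== LEMMAS AND PROOFS =====
def pvKeep (b : String × List String) : Bool :=
  PySem.Set.contains pvWanted b.1 && !b.2.isEmpty

def pvFmt (b : String × List String) : String :=
  b.1 ++ ":\n" ++ PySem.Str.join "" b.2

lemma pvBparts_eq (bs : List (String × List String)) :
    pvBparts bs = (bs.filter pvKeep).map pvFmt := rfl

lemma pvKeep_eq (c : String) (full : List String) :
    pvKeep (c, full) = (pvSections.contains c && !full.isEmpty) := by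
  have h : pvWanted = pvSections := by decide
  rw [pvKeep, h]
  rfl

-- A's flush-on-header / final flush, as one function of the loop state
def pvFlush (st : List String × Option String × List String) : List String :=
  if pvAwanted st.2.1 && !st.2.2.isEmpty then
    st.1 ++ [st.2.1.getD "" ++ ":\n" ++ PySem.Str.join "" st.2.2]
  else st.1

-- invariant linking A's loop state with B's block list
def pvInv (st : List String × Option String × List String)
    (bs : List (String × List String)) : Prop :=
  (st.2.1 = none ∧ st.1 = [] ∧ st.2.2 = [] ∧ bs = []) ∨
  (∃ c rest full, st.2.1 = some c ∧ bs = rest ++ [(c, full)] ∧ st.1 = pvBparts rest ∧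
     ((pvSections.contains c = true ∧ st.2.2 = full) ∨
      (pvSections.contains c = false ∧ st.2.2 = [])))

lemma pvBparts_concat (rest : List (String × List String)) (c : String) (full : List String) :
    pvBparts (rest ++ [(c, full)]) =
      pvBparts rest ++ (if pvKeep (c, full) = true then [pvFmt (c, full)] else []) := by
  by_cases h : pvKeep (c, full) = true <;>
    simp [pvBparts_eq, List.filter_append, List.filter, h]

lemma pvFlush_inv (st : List String × Option String × List String)
    (bs : List (String × List String)) (h : pvInv st bs) :
    pvFlush st = pvBparts bs := by
  obtain ⟨ext, cs, sc⟩ := st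
  rcases h with ⟨hcs, hext, hcont, hbs⟩ | ⟨c, rest, full, hcs, hbs, hext, hc⟩ <;>
    simp only at hcs hext hbs
  · subst hcs hext hbs
    simp only at hcont
    subst hcont
    simp [pvFlush, pvAwanted, pvBparts]
  · subst hcs hext hbs
    rw [pvBparts_concat, pvKeep_eq]
    rcases hc with ⟨hw, hcf⟩ | ⟨hw, hcf⟩ <;> simp only at hcf <;> subst hcf
    · have hmem : c ∈ pvSections := by simpa using hw
      by_cases hf : sc = []
      · simp [pvFlush, pvAwanted, hf]
      · simp [pvFlush, pvAwanted, hmem, hf, pvFmt]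
    · have hmem : c ∉ pvSections := by simpa using hw
      simp [pvFlush, pvAwanted, hmem]

lemma pvInv_step (st : List String × Option String × List String)
    (bs : List (String × List String)) (line : String) (h : pvInv st bs) :
    pvInv (pvAstep st line) (pvBstep bs line) := by
  have hflush := pvFlush_inv st bs h
  obtain ⟨ext, cs, sc⟩ := st
  by_cases hh : (PySem.Str.strip line != "" && pvStrIsupper (PySem.Str.strip line)
      && !(PySem.Str.startswith line " ")) = true
  · have hA : pvAstep (ext, cs, sc) line =
        (pvFlush (ext, cs, sc), some (PySem.Str.strip line), []) := by
      simp only [pvAstep, pvFlush]; rw [if_pos hh]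
    have hB : pvBstep bs line = bs ++ [(PySem.Str.strip line, [])] := by
      simp only [pvBstep]; rw [if_pos hh]
    rw [hA, hB]
    right
    refine ⟨PySem.Str.strip line, bs, [], rfl, rfl, hflush, ?_⟩
    by_cases hw : pvSections.contains (PySem.Str.strip line) = true
    · exact Or.inl ⟨hw, rfl⟩
    · exact Or.inr ⟨by simpa using hw, rfl⟩
  · rcases h with ⟨hcs, hext, hcont, hbs⟩ | ⟨c, rest, full, hcs, hbs, hext, hc⟩
    · simp only at hcs hext hcont hbs
      subst hcs hext hcont hbs
      have hA : pvAstep ([], none, []) line = ([], none, []) := by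
        simp only [pvAstep]; rw [if_neg hh]; simp [pvAwanted]
      have hB : pvBstep [] line = [] := by
        simp only [pvBstep]; rw [if_neg hh]; rfl
      rw [hA, hB]
      exact Or.inl ⟨rfl, rfl, rfl, rfl⟩
    · simp only at hcs hext hbs
      subst hcs hext hbs
      have hB : pvBstep (rest ++ [(c, full)]) line =
          rest ++ [(c, full ++ [line ++ "\n"])] := by
        simp only [pvBstep]; rw [if_neg hh]
        simp
      rw [hB]
      rcases hc with ⟨hw, hcf⟩ | ⟨hw, hcf⟩ <;> simp only at hcf <;> subst hcf
      · have hmem : c ∈ pvSections := by simpa using hw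
        have hA : pvAstep (pvBparts rest, some c, sc) line =
            (pvBparts rest, some c, sc ++ [line ++ "\n"]) := by
          simp only [pvAstep]; rw [if_neg hh]; simp [pvAwanted, hmem]
        rw [hA]
        exact Or.inr ⟨c, rest, sc ++ [line ++ "\n"], rfl, rfl, rfl, Or.inl ⟨hw, rfl⟩⟩
      · have hmem : c ∉ pvSections := by simpa using hw
        have hA : pvAstep (pvBparts rest, some c, []) line =
            (pvBparts rest, some c, []) := by
          simp only [pvAstep]; rw [if_neg hh]; simp [pvAwanted, hmem]
        rw [hA]
        exact Or.inr ⟨c, rest, full ++ [line ++ "\n"], rfl, rfl, rfl, Or.inr ⟨hw, rfl⟩⟩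

lemma pvInv_foldl (lines : List String) (st : List String × Option String × List String)
    (bs : List (String × List String)) (h : pvInv st bs) :
    pvInv (lines.foldl pvAstep st) (lines.foldl pvBstep bs) := by
  induction lines generalizing st bs with
  | nil => exact h
  | cons l t ih => exact ih _ _ (pvInv_step st bs l h)

lemma pvParts_eq (lines : List String) :
    (if pvAwanted (lines.foldl pvAstep ([], none, [])).2.1 &&
        !(lines.foldl pvAstep ([], none, [])).2.2.isEmpty then
       (lines.foldl pvAstep ([], none, [])).1 ++
         [(lines.foldl pvAstep ([], none, [])).2.1.getD "" ++ ":\n" ++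
           PySem.Str.join "" (lines.foldl pvAstep ([], none, [])).2.2]
     else (lines.foldl pvAstep ([], none, [])).1) =
      pvBparts (lines.foldl pvBstep []) := by
  exact pvFlush_inv _ _ (pvInv_foldl lines ([], none, []) [] (Or.inl ⟨rfl, rfl, rfl, rfl⟩))

-- ===== VERDICT (by name: the statement is the Claim_ definition above) =====
theorem parse_man_page_py_spec : Claim_equal_parse_man_page_py := by
  intro man_output _
  unfold Spec_parse_man_page_py parse_man_page_py parse_man_page_py_alt
  by_cases h0 : (man_output == "") = true
  · rw [if_pos h0, if_pos h0]
  · rw [if_neg h0, if_neg h0,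
      pvParts_eq ((PySem.Str.split? man_output "\n").getD [])]
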